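-- pv_equiv track=rewrite | github.com/zhu-zhu-ding/CodeIF-Bench | dynamic_conversation/multi_turn_repo_eval.py | extract_key_error_message
-- ===== SOURCE A (Python) =====
-- def extract_key_error_message(full_output: str, max_length: int = 1024) -> str:
--     lines = full_output.strip().splitlines()
--     key_lines = []
--
--     try:
--         fail_start = lines.index("=================================== FAILURES ===================================")
--     except ValueError:
--         fail_start = -1
--
--     if fail_start != -1:
--         for i in range(fail_start + 1, len(lines)):
--             if lines[i].startswith("=") and "short test summary" in lines[i].lower():
--                 break
--             key_lines.append(lines[i])
--     summary_lines = [line for line in lines if line.strip().startswith("FAILED ")]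
--
--     result_text = "\n".join(key_lines + [""] + summary_lines) if key_lines else "\n".join(summary_lines)
--
--     if len(result_text) > max_length:
--         return result_text[:max_length - 3] + "..."
--     return result_text
-- ===== SOURCE B (Python) =====
-- def extract_key_error_message(full_output: str, max_length: int = 1024) -> str:
--     banner = "=================================== FAILURES ==================================="
--     key_lines, summary_lines = [], []
--     phase = 0  # 0 = before the FAILURES banner, 1 = collecting, 2 = done collecting
--     for line in full_output.strip().splitlines():
--         if phase == 0:
--             if line == banner:
--                 phase = 1
--         elif phase == 1:
--             if line.startswith("=") and "short test summary" in line.lower():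
--                 phase = 2
--             else:
--                 key_lines.append(line)
--         if line.strip().startswith("FAILED "):
--             summary_lines.append(line)
--     parts = key_lines + [""] + summary_lines if key_lines else summary_lines
--     result_text = "\n".join(parts)
--     if len(result_text) > max_length:
--         return result_text[:max_length - 3] + "..."
--     return result_text
-- ===== Notes on version B (the rewrite author's own statement) =====
-- stated objective: alternative
-- what changed: Replaces A's lines.index lookup plus index-range loop with break plus a separate full filter pass by a single linear pass over the lines driven by a three-state phase machine that accumulates key lines and FAILED summary lines simultaneously; the join and truncation step is unchanged.
import Mathlib
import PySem

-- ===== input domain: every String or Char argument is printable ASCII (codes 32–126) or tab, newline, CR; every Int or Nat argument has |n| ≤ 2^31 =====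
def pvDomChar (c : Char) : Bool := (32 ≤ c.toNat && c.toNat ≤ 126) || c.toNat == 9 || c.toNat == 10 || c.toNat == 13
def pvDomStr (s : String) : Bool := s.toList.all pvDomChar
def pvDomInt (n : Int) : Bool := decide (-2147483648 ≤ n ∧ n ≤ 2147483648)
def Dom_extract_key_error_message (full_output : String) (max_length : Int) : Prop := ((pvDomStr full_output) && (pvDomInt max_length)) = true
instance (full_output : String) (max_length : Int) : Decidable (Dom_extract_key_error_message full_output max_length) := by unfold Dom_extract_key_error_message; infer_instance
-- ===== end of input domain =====

-- B replaces A's index-then-range-loop plus a separate filter pass by ONE linear pass over the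
-- lines with a 3-state phase machine accumulating both lists; same join/truncation afterwards.

-- shared literal constants / conditions (the same literals appear in both Pythons)
def pvBanner : String := "=================================== FAILURES ==================================="

def pvIsStop (l : String) : Bool :=
  PySem.Str.startswith l "=" && PySem.Str.isIn "short test summary" (PySem.Str.lower l)

def pvIsFailed (l : String) : Bool :=
  PySem.Str.startswith (PySem.Str.strip l) "FAILED "

-- ===== PORT A =====
-- the 'for i in range(fail_start+1, len(lines)): … break …' loop
def pvCollectA (lines : List String) : List Int → List String
  | [] => []
  | i :: is =>
    let l := PySem.List.pyGetD lines i ""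
    if pvIsStop l then [] else l :: pvCollectA lines is

def extract_key_error_message (full_output : String) (max_length : Int) : String :=
  let lines := PySem.Str.splitlines (PySem.Str.strip full_output)
  let fail_start : Int :=
    match PySem.List.index? lines pvBanner with
    | some i => (i : Int)
    | none => -1
  let key_lines :=
    if fail_start ≠ -1 then
      pvCollectA lines (PySem.List.pyRange (fail_start + 1) (PySem.List.len lines) 1)
    else []
  let summary_lines := lines.filter pvIsFailed
  let result_text :=
    if key_lines ≠ [] then PySem.Str.join "\n" (key_lines ++ [""] ++ summary_lines)
    else PySem.Str.join "\n" summary_lines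
  if max_length < PySem.Str.len result_text then
    PySem.Str.join "" [PySem.Str.slice result_text none (some (max_length - 3)), "..."]
  else result_text

-- ===== PORT B =====
-- single pass; phase 0 = before the banner, 1 = collecting key lines, 2 = done collecting
def pvLoopB : List String → Nat → List String → List String → List String × List String
  | [], _, key, summ => (key.reverse, summ.reverse)
  | l :: rest, phase, key, summ =>
    let pk : Nat × List String :=
      if phase = 0 then (if l = pvBanner then (1, key) else (0, key))
      else if phase = 1 then (if pvIsStop l then (2, key) else (1, l :: key))
      else (2, key)
    let summ' := if pvIsFailed l then l :: summ else summ
    pvLoopB rest pk.1 pk.2 summ'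

def extract_key_error_message_alt (full_output : String) (max_length : Int) : String :=
  let kl := pvLoopB (PySem.Str.splitlines (PySem.Str.strip full_output)) 0 [] []
  let parts := if kl.1 ≠ [] then kl.1 ++ [""] ++ kl.2 else kl.2
  let result_text := PySem.Str.join "\n" parts
  if max_length < PySem.Str.len result_text then
    PySem.Str.join "" [PySem.Str.slice result_text none (some (max_length - 3)), "..."]
  else result_text

-- ===== PRECONDITION & SPEC =====
def Spec_extract_key_error_message (full_output : String) (max_length : Int) (out : String) : Prop := out = extract_key_error_message_alt full_output max_length
instance (full_output : String) (max_length : Int) (out : String) : Decidable (Spec_extract_key_error_message full_output max_length out) := by unfold Spec_extract_key_error_message; infer_instance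

-- ===== CLAIM (what is proved, stated in full; the proofs are below) =====
def Claim_equal_extract_key_error_message : Prop := ∀ (full_output : String) (max_length : Int), Dom_extract_key_error_message full_output max_length → Spec_extract_key_error_message full_output max_length (extract_key_error_message full_output max_length)

-- ===== LEMMAS AND PROOFS =====

-- specification-level description of the key-line extraction
def pvKeyFrom1 : List String → List String
  | [] => []
  | l :: rest => if pvIsStop l then [] else l :: pvKeyFrom1 rest

def pvKeyFrom0 : List String → List String
  | [] => []
  | l :: rest => if l = pvBanner then pvKeyFrom1 rest else pvKeyFrom0 rest

theorem pvLoopB_two (ls : List String) : ∀ key summ,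
    pvLoopB ls 2 key summ = (key.reverse, summ.reverse ++ ls.filter pvIsFailed) := by
  induction ls with
  | nil => intro key summ; simp [pvLoopB]
  | cons l rest ih =>
    intro key summ
    by_cases h : pvIsFailed l = true <;> simp [pvLoopB, ih, h]

theorem pvLoopB_one (ls : List String) : ∀ key summ,
    pvLoopB ls 1 key summ = (key.reverse ++ pvKeyFrom1 ls, summ.reverse ++ ls.filter pvIsFailed) := by
  induction ls with
  | nil => intro key summ; simp [pvLoopB, pvKeyFrom1]
  | cons l rest ih =>
    intro key summ
    by_cases hs : pvIsStop l = true <;>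
      by_cases h : pvIsFailed l = true <;>
        simp [pvLoopB, ih, pvLoopB_two, pvKeyFrom1, hs, h]

theorem pvLoopB_zero (ls : List String) : ∀ key summ,
    pvLoopB ls 0 key summ = (key.reverse ++ pvKeyFrom0 ls, summ.reverse ++ ls.filter pvIsFailed) := by
  induction ls with
  | nil => intro key summ; simp [pvLoopB, pvKeyFrom0]
  | cons l rest ih =>
    intro key summ
    by_cases hb : l = pvBanner
    · subst hb
      by_cases h : pvIsFailed pvBanner = true <;>
        simp [pvLoopB, pvLoopB_one, pvKeyFrom0, h]
    · by_cases h : pvIsFailed l = true <;>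
        simp [pvLoopB, ih, pvKeyFrom0, hb, h]

theorem pvCollectA_eq_keyFrom1_map (lines : List String) : ∀ is : List Int,
    pvCollectA lines is = pvKeyFrom1 (is.map (fun i => PySem.List.pyGetD lines i "")) := by
  intro is
  induction is with
  | nil => simp [pvCollectA, pvKeyFrom1]
  | cons i is ih => simp [pvCollectA, pvKeyFrom1, ih]

theorem pvKeyFrom0_eq_index? (lines : List String) :
    pvKeyFrom0 lines =
      (match PySem.List.index? lines pvBanner with
       | some i => pvKeyFrom1 (lines.drop (i + 1))
       | none => []) := by
  induction lines with
  | nil => simp [pvKeyFrom0, PySem.List.index?]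
  | cons l rest ih =>
    by_cases hb : l = pvBanner
    · subst hb
      rw [PySem.List.index?_cons_self]
      simp [pvKeyFrom0]
    · simp only [pvKeyFrom0, if_neg hb, ih, PySem.List.index?_cons_of_ne rest hb]
      cases h : PySem.List.index? rest pvBanner <;> simp

-- ===== VERDICT (by name: the statement is the Claim_ definition above) =====
theorem extract_key_error_message_spec : Claim_equal_extract_key_error_message := by
  intro full_output max_length _
  unfold Spec_extract_key_error_message extract_key_error_message extract_key_error_message_alt
  rw [pvLoopB_zero]
  generalize PySem.Str.splitlines (PySem.Str.strip full_output) = lines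
  simp only [List.reverse_nil, List.nil_append, pvKeyFrom0_eq_index?]
  cases hidx : PySem.List.index? lines pvBanner with
  | none => simp
  | some i =>
    have hne : ¬((i : Int) = -1) := by omega
    have ht : (((i : Int)) + 1).toNat = i + 1 := by omega
    rw [pvCollectA_eq_keyFrom1_map, if_pos hne,
        PySem.List.map_pyGetD_pyRange lines "" (by positivity), ht]
    by_cases hk : pvKeyFrom1 (List.drop (i + 1) lines) = [] <;> simp [hk]
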